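-- pv_equiv track=rewrite | github.com/Qondor/Python-Daily-Challenge | Daily Challenges/Daily Challenge #117 - MinMinMax/MinMinMax.py | minMinMax
-- ===== SOURCE A (Python) =====
-- def minMinMax(numbers):
--     """minMinMax machine.
--
--     Given an unsorted array of integers, find the smallest number in the array, the largest number in the array, and the smallest number between the two array bounds that are not in the array.
--     """
--
--     smallest = min(numbers)
--     minimumAbsent = smallest
--     while (minimumAbsent) == min(numbers):
--         numbers.remove(minimumAbsent)
--         minimumAbsent += 1
--     largest = max(numbers)
--
--     return f'Smallest: {smallest} Minimum absent: {minimumAbsent} Largest: {largest}'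
-- ===== SOURCE B (Python) =====
-- def minMinMax(numbers):
--     """minMinMax machine.
--
--     Given an unsorted array of integers, find the smallest number in the array, the largest number in the array, and the smallest number between the two array bounds that are not in the array.
--     """
--     s = sorted(numbers)
--     smallest = s[0]
--     i = 0
--     n = len(s)
--     while i < n and s[i] == smallest + i:
--         i += 1
--     minimumAbsent = smallest + i
--     largest = max(s[i:])
--     return f'Smallest: {smallest} Minimum absent: {minimumAbsent} Largest: {largest}'
-- ===== Notes on version B (the rewrite author's own statement) =====
-- stated objective: alternative
-- what changed: Replaced A's repeated min()+remove() removal loop by a single sort followed by one index scan over the sorted list (minimumAbsent = first index where sorted[i] != min+i; largest = max of the sorted suffix); B avoids A's quadratic worst case on consecutive runs but is not measurably faster on typical inputs, and B does not mutate its argument while A destructively removes elements.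
-- outside the precondition, e.g. on minMinMax([]): A raises ValueError, B raises IndexError
import Mathlib
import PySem

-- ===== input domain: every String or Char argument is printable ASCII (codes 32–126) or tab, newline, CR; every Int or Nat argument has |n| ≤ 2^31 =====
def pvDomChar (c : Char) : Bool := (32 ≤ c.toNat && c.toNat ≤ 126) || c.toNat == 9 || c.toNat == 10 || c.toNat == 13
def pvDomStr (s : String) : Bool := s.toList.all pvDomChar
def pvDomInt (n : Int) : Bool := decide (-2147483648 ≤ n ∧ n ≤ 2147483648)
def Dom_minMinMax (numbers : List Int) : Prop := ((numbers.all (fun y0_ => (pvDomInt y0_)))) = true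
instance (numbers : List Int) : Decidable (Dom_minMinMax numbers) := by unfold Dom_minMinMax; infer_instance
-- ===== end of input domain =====

-- B replaces A's repeated min()+remove() removal loop by sort-once + a single index scan
-- (alternative algorithm; not claimed faster); A mutates its argument list, B does not:
-- the equivalence proved here is about the RETURN value only.


-- ===== PORT A =====
-- the while loop; fuel = numbers.length + 1 only makes the recursion total: each
-- iteration removes one element, so fuel is never exhausted before min([]) raises
def aLoop (fuel : Nat) (l : List Int) (k : Int) : Option (Int × List Int) :=
  match fuel with
  | 0 => none
  | fuel + 1 =>
    match PySem.List.min? l (fun x => x) with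
    | none => none                      -- min([]) : ValueError
    | some mn =>
      if k = mn then
        match PySem.List.remove? l k with
        | some rest => aLoop fuel rest (k + 1)
        | none => none                  -- unreachable: k = mn ∈ l
      else some (k, l)

def minMinMax (numbers : List Int) : String :=
  match PySem.List.min? numbers (fun x => x) with
  | none => ""                          -- min([]) : ValueError (outside Pre_)
  | some smallest =>
    match aLoop (numbers.length + 1) numbers smallest with
    | none => ""                        -- min([]) inside the loop : ValueError (outside Pre_)
    | some (minimumAbsent, rest) =>
      match PySem.List.max? rest (fun x => x) with
      | none => ""                      -- unreachable inside Pre_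
      | some largest =>
        "Smallest: " ++ PySem.Int.toStr smallest ++ " Minimum absent: " ++
          PySem.Int.toStr minimumAbsent ++ " Largest: " ++ PySem.Int.toStr largest

-- ===== PORT B =====
-- the while loop of Source B: advance i while i < len(s) and s[i] == m + i
def bScan (s : List Int) (m : Int) (i : Nat) : Nat :=
  if h : i < s.length then
    if s[i] = m + (i : Int) then bScan s m (i + 1) else i
  else i
termination_by s.length - i

def minMinMax_alt (numbers : List Int) : String :=
  let s := PySem.List.sorted numbers (fun x => x) false
  match PySem.List.pyGet? s 0 with
  | none => ""                          -- s[0] on empty : IndexError (outside Pre_)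
  | some smallest =>
    let i := bScan s smallest 0
    let minimumAbsent := smallest + (i : Int)
    match PySem.List.max? (PySem.List.slice s (some (i : Int)) none) (fun x => x) with
    | none => ""                        -- max([]) : ValueError (outside Pre_)
    | some largest =>
      "Smallest: " ++ PySem.Int.toStr smallest ++ " Minimum absent: " ++
        PySem.Int.toStr minimumAbsent ++ " Largest: " ++ PySem.Int.toStr largest

-- ===== PRECONDITION & SPEC =====
-- Pre_ excludes exactly the inputs on which Python A raises ValueError: the empty list and
-- lists of distinct consecutive integers (there the removal loop empties the list and
-- min([]) raises). B raises on the same inputs (IndexError / ValueError).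
def Pre_minMinMax (numbers : List Int) : Prop :=
  numbers ≠ [] ∧
    ¬ (numbers.Nodup ∧ ∀ x ∈ numbers, (∃ y ∈ numbers, x < y) → x + 1 ∈ numbers)
instance (numbers : List Int) : Decidable (Pre_minMinMax numbers) := by
  unfold Pre_minMinMax; infer_instance

def pvWitness_minMinMax : List Int := [3, 1, 1]

def Spec_minMinMax (numbers : List Int) (out : String) : Prop := out = minMinMax_alt numbers
instance (numbers : List Int) (out : String) : Decidable (Spec_minMinMax numbers out) := by
  unfold Spec_minMinMax; infer_instance

-- ===== CLAIM (what is proved, stated in full; the proofs are below) =====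
def Claim_equal_minMinMax : Prop := ∀ (numbers : List Int), Dom_minMinMax numbers → Pre_minMinMax numbers → Spec_minMinMax numbers (minMinMax numbers)

-- ===== LEMMAS AND PROOFS =====

-- the value of max?/min? with the identity key is permutation-invariant
theorem max?_id_eq_of_perm (l l' : List Int) (h : l.Perm l') :
    PySem.List.max? l (fun x => x) = PySem.List.max? l' (fun x => x) := by
  rcases hml : PySem.List.max? l (fun x => x) with _ | M
  · have hl : l = [] := (PySem.List.max?_eq_none_iff _ _).mp hml
    subst hl
    have : l' = [] := h.nil_eq.symm
    subst this
    exact hml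
  · rcases hml' : PySem.List.max? l' (fun x => x) with _ | M'
    · have hl' : l' = [] := (PySem.List.max?_eq_none_iff _ _).mp hml'
      subst hl'
      have : l = [] := h.eq_nil
      subst this
      rw [(PySem.List.max?_eq_none_iff _ _).mpr rfl] at hml
      cases hml
    · have h1 := PySem.List.max?_mem hml
      have h2 := PySem.List.max?_mem hml'
      have h3 := PySem.List.max?_isMax hml M' (h.mem_iff.mpr h2)
      have h4 := PySem.List.max?_isMax hml' M (h.mem_iff.mp h1)
      exact congrArg some (le_antisymm h4 h3)

theorem min?_id_eq_of_perm (l l' : List Int) (h : l.Perm l') :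
    PySem.List.min? l (fun x => x) = PySem.List.min? l' (fun x => x) := by
  rcases hml : PySem.List.min? l (fun x => x) with _ | M
  · have hl : l = [] := (PySem.List.min?_eq_none_iff _ _).mp hml
    subst hl
    have : l' = [] := h.nil_eq.symm
    subst this
    exact hml
  · rcases hml' : PySem.List.min? l' (fun x => x) with _ | M'
    · have hl' : l' = [] := (PySem.List.min?_eq_none_iff _ _).mp hml'
      subst hl'
      have : l = [] := h.eq_nil
      subst this
      rw [(PySem.List.min?_eq_none_iff _ _).mpr rfl] at hml
      cases hml
    · have h1 := PySem.List.min?_mem hml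
      have h2 := PySem.List.min?_mem hml'
      have h3 := PySem.List.min?_isMin hml M' (h.mem_iff.mpr h2)
      have h4 := PySem.List.min?_isMin hml' M (h.mem_iff.mp h1)
      exact congrArg some (le_antisymm h3 h4)

-- the min of a nonempty suffix of a sorted list is its first element
theorem min?_id_sorted_drop (s : List Int) (hs : s.Pairwise (· ≤ ·)) (i : Nat)
    (hi : i < s.length) :
    PySem.List.min? (s.drop i) (fun x => x) = some s[i] := by
  have hd : s.drop i = s[i] :: s.drop (i + 1) := List.drop_eq_getElem_cons hi
  have hne : s.drop i ≠ [] := List.ne_nil_of_length_pos (by rw [List.length_drop]; omega)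
  rcases hm : PySem.List.min? (s.drop i) (fun x => x) with _ | M
  · exact absurd ((PySem.List.min?_eq_none_iff _ _).mp hm) hne
  · have h1 := PySem.List.min?_mem hm
    have h2 := PySem.List.min?_isMin hm s[i] (by rw [hd]; exact List.mem_cons_self ..)
    have hp : (s.drop i).Pairwise (· ≤ ·) := hs.sublist (List.drop_sublist i s)
    rw [hd] at hp h1
    have h3 : s[i] ≤ M := by
      rcases List.mem_cons.mp h1 with h | h
      · omega
      · exact (List.pairwise_cons.mp hp).1 M h
    exact congrArg some (le_antisymm h2 h3)

-- simulation: A's removal loop, run on any permutation of the sorted suffix s.drop i with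
-- counter m + i, tracks B's index scan bScan from i; it ends with none exactly when the
-- scan exhausts s, else with the same counter and a leftover permutation of the suffix
theorem loop_sim (s : List Int) (hs : s.Pairwise (· ≤ ·)) (m : Int) :
    ∀ (fuel : Nat) (l : List Int) (i : Nat), i ≤ s.length → l.length < fuel →
      l.Perm (s.drop i) →
      (bScan s m i = s.length ∧ aLoop fuel l (m + (i : Int)) = none) ∨
      (∃ l', bScan s m i < s.length ∧
        aLoop fuel l (m + (i : Int)) = some (m + (bScan s m i : Int), l') ∧
        l'.Perm (s.drop (bScan s m i))) := by
  intro fuel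
  induction fuel with
  | zero => intro l i _ hf _; omega
  | succ fuel ih =>
    intro l i hi hf hperm
    by_cases hlt : i < s.length
    · have hd : s.drop i = s[i] :: s.drop (i + 1) := List.drop_eq_getElem_cons hlt
      have hmin : PySem.List.min? l (fun x => x) = some s[i] := by
        rw [min?_id_eq_of_perm l _ hperm, min?_id_sorted_drop s hs i hlt]
      by_cases hc : m + (i : Int) = s[i]
      · have hmem : m + (i : Int) ∈ l := by
          rw [hc]; exact hperm.mem_iff.mpr (by rw [hd]; exact List.mem_cons_self ..)
        have hrem : PySem.List.remove? l (m + (i : Int)) = some (l.erase (m + (i : Int))) :=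
          PySem.List.remove?_eq_some_erase l _ hmem
        have hlpos : 0 < l.length := List.length_pos_of_mem hmem
        have hlen : (l.erase (m + (i : Int))).length < fuel := by
          rw [List.length_erase_of_mem hmem]; omega
        have hperm' : (l.erase (m + (i : Int))).Perm (s.drop (i + 1)) := by
          have h2 := hperm.erase (m + (i : Int))
          rw [hd, hc, List.erase_cons_head] at h2
          rw [hc]
          exact h2
        have hbs : bScan s m i = bScan s m (i + 1) := by
          rw [bScan, dif_pos hlt, if_pos hc.symm]
        have hcast : m + (i : Int) + 1 = m + ((i + 1 : Nat) : Int) := by push_cast; ring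
        have hred : aLoop (fuel + 1) l (m + (i : Int)) =
            aLoop fuel (l.erase (m + (i : Int))) (m + ((i + 1 : Nat) : Int)) := by
          simp only [aLoop, hmin, if_pos hc, hrem, hcast]
        rw [hbs, hred]
        exact ih (l.erase (m + (i : Int))) (i + 1) (by omega) hlen hperm'
      · have hbs : bScan s m i = i := by
          rw [bScan, dif_pos hlt, if_neg (fun h => hc h.symm)]
        right
        refine ⟨l, by rw [hbs]; exact hlt, ?_, by rw [hbs]; exact hperm⟩
        rw [hbs]
        simp only [aLoop, hmin, if_neg hc]
    · have hnil : s.drop i = [] := by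
        apply List.drop_eq_nil_of_le; omega
      have hl : l = [] := by rw [hnil] at hperm; exact hperm.eq_nil
      left
      constructor
      · rw [bScan, dif_neg hlt]; omega
      · subst hl
        simp only [aLoop, (PySem.List.min?_eq_none_iff _ _).mpr rfl]

-- A = B on every nonempty list (both return "" together on the consecutive-run raise case)
theorem minMinMax_eq_alt (numbers : List Int) (hne : numbers ≠ []) :
    minMinMax numbers = minMinMax_alt numbers := by
  have hperm : (PySem.List.sorted numbers (fun x => x) false).Perm numbers :=
    PySem.List.sorted_perm ..
  set s := PySem.List.sorted numbers (fun x => x) false with hsdef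
  have hs : s.Pairwise (· ≤ ·) := by
    have := PySem.List.sorted_pairwise (xs := numbers) (key := fun x => x)
    simpa using this
  have hsne : s ≠ [] := by
    rw [hsdef, Ne, PySem.List.sorted_eq_nil_iff]; exact hne
  have h0 : 0 < s.length := List.length_pos_iff.mpr hsne
  have hmin : PySem.List.min? numbers (fun x => x) = some s[0] := by
    rw [min?_id_eq_of_perm numbers s hperm.symm]
    have := min?_id_sorted_drop s hs 0 h0
    rwa [List.drop_zero] at this
  have hget : PySem.List.pyGet? s 0 = some s[0] := by
    rw [PySem.List.pyGet?_zero, List.getElem?_eq_getElem h0]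
  have hloop := loop_sim s hs s[0] (numbers.length + 1) numbers 0 (by omega)
      (by omega) (by rw [List.drop_zero]; exact hperm.symm)
  rw [show s[0] + ((0 : Nat) : Int) = s[0] by simp] at hloop
  rcases hloop with ⟨hb, ha⟩ | ⟨l', hb, ha, hp⟩
  · have hmax : PySem.List.max?
        (PySem.List.slice s (some ((bScan s s[0] 0 : Nat) : Int)) none) (fun x => x) = none := by
      rw [PySem.List.slice_from_natCast, hb, List.drop_length]
      exact (PySem.List.max?_eq_none_iff _ _).mpr rfl
    simp only [minMinMax, minMinMax_alt, hmin, ha]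
    rw [← hsdef]
    simp only [hget, hmax]
  · have hmax : PySem.List.max?
        (PySem.List.slice s (some ((bScan s s[0] 0 : Nat) : Int)) none) (fun x => x) =
        PySem.List.max? l' (fun x => x) := by
      rw [PySem.List.slice_from_natCast]
      exact (max?_id_eq_of_perm _ _ hp).symm
    simp only [minMinMax, minMinMax_alt, hmin, ha]
    rw [← hsdef]
    simp only [hget, hmax]

-- ===== VERDICT (by name: the statement is the Claim_ definition above) =====
theorem minMinMax_spec : Claim_equal_minMinMax := by
  intro numbers _ hpre
  exact minMinMax_eq_alt numbers hpre.1
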